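-- pv_equiv track=rewrite | github.com/martadelfino/code_review | PyLD.py | count_haplotypes
-- ===== SOURCE A (Python) =====
-- import itertools
--
-- def count_haplotypes(compare_genotypes):
--     '''Function counts how many of each haplotype exist
--     The 00 is PA PB alleles (so reference, reference for each rsID)
--     01 is PA Pb alleles
--     10 is Pa PB alleles
--     11 is Pa Pb alleles
--     This is only possible because the vcf files I used had phased data.
--     '''
--
--     '''
--      "itertools.groupby" makes this a "one-liner", if that's a *good*
--      thing. *Might* be faster than "+=". Don't forget to sort. -GRG
--     '''
--     return {
--         hap: len(list(group)) for hap, group in itertools.groupby(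
--             sorted(compare_genotypes))
--     }
-- ===== SOURCE B (Python) =====
-- def count_haplotypes(compare_genotypes):
--     '''Single-pass hash counting instead of sort+groupby; distinct keys sorted at the end.'''
--     counts = {}
--     for hap in compare_genotypes:
--         counts[hap] = counts.get(hap, 0) + 1
--     return dict(sorted(counts.items(), key=lambda item: item[0]))
-- ===== Notes on version B (the rewrite author's own statement) =====
-- stated objective: alternative
-- what changed: Replaces sort-all-then-groupby with a single hash-counting pass over the list, sorting only the distinct haplotypes at the end (key order still sorted, so the dicts are identical).
import Mathlib
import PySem

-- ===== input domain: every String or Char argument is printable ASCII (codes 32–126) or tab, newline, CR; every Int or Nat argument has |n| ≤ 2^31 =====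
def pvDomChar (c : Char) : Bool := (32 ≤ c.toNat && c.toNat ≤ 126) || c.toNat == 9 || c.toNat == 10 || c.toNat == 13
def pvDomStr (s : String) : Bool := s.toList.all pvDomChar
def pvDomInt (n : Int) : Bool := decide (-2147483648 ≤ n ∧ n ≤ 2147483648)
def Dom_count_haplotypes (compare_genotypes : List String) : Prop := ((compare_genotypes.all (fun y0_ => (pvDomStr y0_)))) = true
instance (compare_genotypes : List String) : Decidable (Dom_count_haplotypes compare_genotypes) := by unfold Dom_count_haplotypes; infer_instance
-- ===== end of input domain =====

-- B replaces sort-all-then-groupby by one hash-counting pass plus a sort of the distinct keys (same sorted-key dict).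


-- ===== PORT A =====
-- itertools.groupby over a list: one (key, length-of-run) pair per maximal run of equal adjacent elements
def pvGroupRuns : List String → List (String × Int)
  | [] => []
  | x :: rest =>
      (x, (1 + (rest.takeWhile (· == x)).length : Int)) ::
        pvGroupRuns (rest.dropWhile (· == x))
termination_by l => l.length
decreasing_by
  simpa using Nat.lt_succ_of_le ((List.dropWhile_sublist _).length_le)

-- {hap: len(list(group)) for hap, group in itertools.groupby(sorted(compare_genotypes))}
def count_haplotypes (compare_genotypes : List String) : List (String × Int) :=
  ((pvGroupRuns (PySem.List.sorted compare_genotypes (fun x => x) false)).foldl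
      (fun d p => d.insert p.1 p.2) (PySem.Dict.empty : PySem.Dict String Int)).items

-- ===== PORT B =====
-- counts = {}; for hap in …: counts[hap] = counts.get(hap, 0) + 1; return dict(sorted(counts.items(), key=…[0]))
def count_haplotypes_alt (compare_genotypes : List String) : List (String × Int) :=
  let counts := compare_genotypes.foldl
      (fun d x => d.insert x (d.getD x 0 + 1)) (PySem.Dict.empty : PySem.Dict String Int)
  (PySem.Dict.ofList (PySem.List.sorted counts.items (fun item => item.1) false)).items

-- ===== PRECONDITION & SPEC =====
def Spec_count_haplotypes (compare_genotypes : List String) (out : List (String × Int)) : Prop := out = count_haplotypes_alt compare_genotypes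
instance (compare_genotypes : List String) (out : List (String × Int)) : Decidable (Spec_count_haplotypes compare_genotypes out) := by unfold Spec_count_haplotypes; infer_instance

-- ===== CLAIM (what is proved, stated in full; the proofs are below) =====
def Claim_equal_count_haplotypes : Prop := ∀ (compare_genotypes : List String), Dom_count_haplotypes compare_genotypes → Spec_count_haplotypes compare_genotypes (count_haplotypes compare_genotypes)

-- ===== LEMMAS AND PROOFS =====

-- On a ≤-sorted list, the runs are exactly the distinct elements (in first-occurrence order) with their counts, and the run keys are strictly increasing.
lemma pvRunsSpec (s : List String) (hp : List.Pairwise (· ≤ ·) s) :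
    (∀ k c, ((k, c) ∈ pvGroupRuns s ↔ k ∈ s ∧ c = (s.count k : Int))) ∧
      List.Pairwise (fun a b => a.1 < b.1) (pvGroupRuns s) := by
  match s with
  | [] => simp [pvGroupRuns]
  | x :: rest =>
    set t := rest.takeWhile (· == x) with ht
    set d := rest.dropWhile (· == x) with hd
    have hsplit : rest = t ++ d := (List.takeWhile_append_dropWhile (p := (· == x)) (l := rest)).symm
    have ht_eq : ∀ y ∈ t, y = x := by
      intro y hy
      have := List.mem_takeWhile_imp hy
      exact eq_of_beq this
    have hrest_pw : List.Pairwise (· ≤ ·) rest := (List.pairwise_cons.mp hp).2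
    have hx_le : ∀ y ∈ rest, x ≤ y := (List.pairwise_cons.mp hp).1
    have hd_sub : d.Sublist rest := List.dropWhile_sublist _
    have hd_pw : List.Pairwise (· ≤ ·) d := hrest_pw.sublist hd_sub
    have hx_notin : x ∉ d := by
      intro hxd
      match hdd : d with
      | [] => simp at hxd
      | h :: d' =>
        have hh : ¬ ((h == x) = true) := by
          have := List.head?_dropWhile_not (· == x) rest
          rw [← hd] at this
          simpa using this
        have hhx : h ≠ x := by simpa using hh
        have hxh : x ≤ h := hx_le h (hd_sub.mem (by simp))
        rcases (by simpa using hxd : x = h ∨ x ∈ d') with rfl | hx'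
        · exact hhx rfl
        · have : h ≤ x := ((List.pairwise_cons.mp hd_pw).1) x hx'
          exact hhx (le_antisymm this hxh)
    have hcount_t : t.count x = t.length := by
      rw [List.count_eq_length]
      intro y hy; exact (ht_eq y hy) ▸ rfl
    have hcount_xd : d.count x = 0 := List.count_eq_zero.mpr hx_notin
    have ih := pvRunsSpec d hd_pw
    have hruns : pvGroupRuns (x :: rest) =
        (x, (1 + t.length : Int)) :: pvGroupRuns d := by
      rw [pvGroupRuns]
    have hcx : (((x :: rest).count x : Nat) : Int) = 1 + (t.length : Int) := by
      rw [hsplit, List.count_cons_self, List.count_append, hcount_t, hcount_xd]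
      push_cast; ring
    have hck : ∀ k, k ≠ x → (x :: rest).count k = d.count k := by
      intro k hkx
      have hkt0 : t.count k = 0 := List.count_eq_zero.mpr (fun hkt => hkx (ht_eq k hkt))
      rw [hsplit]
      simp [List.count_append, hkt0, Ne.symm hkx]
    constructor
    · intro k c
      rw [hruns, List.mem_cons]
      constructor
      · rintro (hkc | hkc)
        · obtain ⟨rfl, rfl⟩ := Prod.mk.inj hkc
          exact ⟨by simp, hcx.symm⟩
        · obtain ⟨hkd, hc⟩ := (ih.1 k c).mp hkc
          have hkx : k ≠ x := fun h => hx_notin (h ▸ hkd)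
          refine ⟨List.mem_cons_of_mem _ ?_, by rw [hc, hck k hkx]⟩
          rw [hsplit]; exact List.mem_append_right t hkd
      · rintro ⟨hk, hc⟩
        by_cases hkx : k = x
        · subst hkx
          left
          rw [hc, hcx]
        · right
          have hkrest : k ∈ rest := (List.mem_cons.mp hk).resolve_left hkx
          rw [hsplit] at hkrest
          have hkd : k ∈ d := by
            rcases List.mem_append.mp hkrest with h | h
            · exact absurd (ht_eq k h) hkx
            · exact h
          exact (ih.1 k c).mpr ⟨hkd, by rw [hc, hck k hkx]⟩
    · rw [hruns]
      refine List.pairwise_cons.mpr ⟨?_, ih.2⟩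
      intro b hb
      have hb1 : b.1 ∈ d ∧ b.2 = (d.count b.1 : Int) := (ih.1 b.1 b.2).mp (by simpa using hb)
      have hxle : x ≤ b.1 := hx_le b.1 (hd_sub.mem hb1.1)
      have hxne : x ≠ b.1 := fun h => hx_notin (h ▸ hb1.1)
      exact lt_of_le_of_ne hxle hxne
termination_by s.length
decreasing_by
  simpa using Nat.lt_succ_of_le ((List.dropWhile_sublist _).length_le)

theorem count_haplotypes_spec : Claim_equal_count_haplotypes := by
  intro xs _
  unfold Spec_count_haplotypes count_haplotypes count_haplotypes_alt
  -- abbreviations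
  set s := PySem.List.sorted xs (fun x => x) false with hs
  have hpw : List.Pairwise (· ≤ ·) s := by
    simpa using PySem.List.sorted_pairwise xs (fun x => x)
  obtain ⟨hmem, hlt⟩ := pvRunsSpec s hpw
  have hperm_s : s.Perm xs := PySem.List.sorted_perm xs (fun x => x) false
  -- runs keys are nodup pairs
  have hruns_nodup : (pvGroupRuns s).Nodup :=
    hlt.imp (fun h => fun he => absurd (congrArg Prod.fst he) (ne_of_lt h))
  have hruns_fst_nodup : ((pvGroupRuns s).map Prod.fst).Nodup :=
    (List.pairwise_map).mpr (hlt.imp ne_of_lt)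
  -- A's dict over the runs: fresh distinct keys, so items = runs
  have hA : ((pvGroupRuns s).foldl (fun d p => d.insert p.1 p.2)
        (PySem.Dict.empty : PySem.Dict String Int)).items = pvGroupRuns s := by
    rw [PySem.Dict.items_foldl_insert_fresh (pvGroupRuns s) Prod.fst Prod.snd _
      (by intro a _; exact PySem.Dict.contains_empty _) hruns_fst_nodup]
    simp [show (PySem.Dict.empty : PySem.Dict String Int).items = [] from rfl]
  -- B's counting loop is Counter
  have hB0 : xs.foldl (fun d x => d.insert x (d.getD x 0 + 1))
      (PySem.Dict.empty : PySem.Dict String Int) = PySem.Dict.counter xs :=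
    PySem.Dict.foldl_insert_getD_add_one_eq_counter xs
  -- the sorted items of Counter(xs) are exactly the runs of sorted(xs)
  have hitems : (PySem.Dict.counter xs).items
      = (PySem.Set.ofList xs).map (fun k => (k, (xs.count k : Int))) :=
    PySem.Dict.items_counter xs
  have hkeys_nodup : ((PySem.Dict.counter xs).items.map Prod.fst).Nodup := by
    have := PySem.Dict.nodup_keys_counter (κ := String) xs
    simpa [PySem.Dict.keys] using this
  have hitems_nodup : (PySem.Dict.counter xs).items.Nodup := hkeys_nodup.of_map
  have hperm : (pvGroupRuns s).Perm (PySem.Dict.counter xs).items := by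
    rw [List.perm_ext_iff_of_nodup hruns_nodup hitems_nodup]
    intro p
    obtain ⟨k, c⟩ := p
    rw [hmem k c, hitems]
    constructor
    · rintro ⟨hk, hc⟩
      have hkxs : k ∈ xs := hperm_s.mem_iff.mp hk
      refine List.mem_map.mpr ⟨k, ?_, ?_⟩
      · exact (PySem.Set.mem_ofList _ _).mpr hkxs
      · rw [hc, hperm_s.count_eq]
    · intro hp
      obtain ⟨a, ha, hae⟩ := List.mem_map.mp hp
      obtain ⟨rfl, rfl⟩ : a = k ∧ (xs.count a : Int) = c := by
        refine ⟨congrArg Prod.fst hae, congrArg Prod.snd hae⟩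
      refine ⟨?_, ?_⟩
      · exact hperm_s.mem_iff.mpr ((PySem.Set.mem_ofList _ _).mp ha)
      · rw [hperm_s.count_eq]
  have hsorted : PySem.List.sorted (PySem.Dict.counter xs).items (fun item => item.1) false
      = pvGroupRuns s :=
    PySem.List.sorted_eq_of_perm_of_pairwise_lt _ _ _ hperm hlt
  -- B's final dict over sorted items: fresh distinct keys again
  have hsorted_fst_nodup :
      ((PySem.List.sorted (PySem.Dict.counter xs).items (fun item => item.1) false).map Prod.fst).Nodup := by
    rw [hsorted]; exact hruns_fst_nodup
  have hB : (PySem.Dict.ofList (PySem.List.sorted (PySem.Dict.counter xs).items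
        (fun item => item.1) false)).items
      = PySem.List.sorted (PySem.Dict.counter xs).items (fun item => item.1) false := by
    show ((PySem.List.sorted (PySem.Dict.counter xs).items (fun item => item.1) false).foldl
        (fun d p => d.insert p.1 p.2) (PySem.Dict.empty : PySem.Dict String Int)).items = _
    rw [PySem.Dict.items_foldl_insert_fresh _ Prod.fst Prod.snd _
      (by intro a _; exact PySem.Dict.contains_empty _) hsorted_fst_nodup]
    simp [show (PySem.Dict.empty : PySem.Dict String Int).items = [] from rfl]
  simp only [hB0, hB, hA]
  exact hsorted.symm
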